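-- pv_equiv track=rewrite | github.com/iphosi/leetcode | 数组/构造逆序对.py | func
-- ===== SOURCE A (Python) =====
-- def func(n, k):
--     nums = [i for i in range(1, n + 1)]
--
--     i = n - 1
--
--     result = []
--
--     while k >= i and nums:
--         result.append(nums.pop())
--         k -= i
--         i -= 1
--
--     if nums:
--         result.append(nums.pop(k))
--
--     result.extend(nums)
--
--     return result
-- ===== SOURCE B (Python) =====
-- def func(n, k):
--     # Compute the number m of values taken from the top by pure arithmetic,
--     # then construct the answer directly from ranges (no interleaved mutation).
--     m = 0
--     i = n - 1
--     while k >= i and m < n: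
--         k -= i
--         i -= 1
--         m += 1
--     big = list(range(n, n - m, -1))
--     small = list(range(1, n - m + 1))
--     if small:
--         pivot = small.pop(k)
--         return big + [pivot] + small
--     return big
-- ===== Notes on version B (the rewrite author's own statement) =====
-- stated objective: alternative
-- what changed: A interleaves popping elements off a materialized list with building the result; B first computes the count m of top values and the residual k by a counter-only arithmetic loop (no list mutation), then constructs the answer directly as range(n, n-m, -1) plus the pivot popped from range(1, n-m+1).
import Mathlib
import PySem

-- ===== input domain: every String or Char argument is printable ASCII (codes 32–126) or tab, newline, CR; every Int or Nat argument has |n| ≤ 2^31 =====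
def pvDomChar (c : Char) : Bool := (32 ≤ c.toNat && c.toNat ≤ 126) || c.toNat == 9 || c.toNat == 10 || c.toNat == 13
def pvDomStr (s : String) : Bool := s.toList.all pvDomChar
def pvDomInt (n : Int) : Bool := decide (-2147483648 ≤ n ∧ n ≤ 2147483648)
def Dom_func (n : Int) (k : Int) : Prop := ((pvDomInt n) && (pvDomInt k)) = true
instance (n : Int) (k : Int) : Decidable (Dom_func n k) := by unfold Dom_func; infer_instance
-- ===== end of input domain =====

-- B replaces A's interleaved pop()/extend list mutation by a counter-only arithmetic
-- loop followed by direct construction from ranges (alternative decomposition, same cost).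

-- ===== PORT A =====
-- the while loop: pops from the end of nums while k >= i
def funcLoop (nums : List Int) (k i : Int) (result : List Int) : List Int × List Int × Int :=
  if h : k ≥ i ∧ nums ≠ [] then
    funcLoop nums.dropLast (k - i) (i - 1) (result ++ [nums.getLast h.2])
  else (nums, result, k)
termination_by nums.length
decreasing_by
  simp only [List.length_dropLast]
  exact Nat.sub_lt (List.length_pos_of_ne_nil h.2) Nat.one_pos

def func (n : Int) (k : Int) : List Int :=
  let nums := PySem.List.pyRange 1 (n + 1) 1
  let t := funcLoop nums k (n - 1) []
  if t.1 ≠ [] then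
    match PySem.List.pop? t.1 t.2.2 with
    | some (v, rest) => (t.2.1 ++ [v]) ++ rest
    | none => []          -- IndexError in Python: outside Pre_func
  else t.2.1 ++ t.1

-- ===== PORT B =====
-- counter-only loop: how many values m are taken from the top, and the residual k
def altCount (k i m n : Int) : Int × Int :=
  if h : k ≥ i ∧ m < n then altCount (k - i) (i - 1) (m + 1) n else (m, k)
termination_by (n - m).toNat
decreasing_by omega

def func_alt (n : Int) (k : Int) : List Int :=
  let t := altCount k (n - 1) 0 n
  let big := PySem.List.pyRange n (n - t.1) (-1)
  let small := PySem.List.pyRange 1 (n - t.1 + 1) 1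
  if small ≠ [] then
    match PySem.List.pop? small t.2 with
    | some (pivot, rest) => (big ++ [pivot]) ++ rest
    | none => []          -- IndexError in Python: outside Pre_func
  else big

-- ===== PRECONDITION & SPEC =====
-- Pre_ excludes exactly the inputs where Python A raises IndexError (n ≥ 1 with k < -n,
-- where nums.pop(k) is out of range); Python B raises there too.
def Pre_func (n : Int) (k : Int) : Prop := n ≤ 0 ∨ -n ≤ k
instance (n : Int) (k : Int) : Decidable (Pre_func n k) := by unfold Pre_func; infer_instance
def pvWitness_func : Int × Int := (4, 2)

def Spec_func (n : Int) (k : Int) (out : List Int) : Prop := out = func_alt n k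
instance (n : Int) (k : Int) (out : List Int) : Decidable (Spec_func n k out) := by unfold Spec_func; infer_instance

-- ===== CLAIM (what is proved, stated in full; the proofs are below) =====
def Claim_equal_func : Prop := ∀ (n : Int) (k : Int), Dom_func n k → Pre_func n k → Spec_func n k (func n k)

-- ===== LEMMAS AND PROOFS =====

-- proof-side description of both loops: number of steps and residual k for remaining length L
def stepsFn : Nat → Int → Nat × Int
  | 0, k => (0, k)
  | (L + 1), k =>
      if (L : Int) ≤ k then
        let r := stepsFn L (k - L)
        (r.1 + 1, r.2)
      else (0, k)

lemma stepsFn_le (L : Nat) (k : Int) : (stepsFn L k).1 ≤ L := by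
  induction L generalizing k with
  | zero => simp [stepsFn]
  | succ L ih =>
      rw [stepsFn]
      split
      · exact Nat.succ_le_succ (ih _)
      · exact Nat.zero_le _

lemma altCount_eq (L : Nat) : ∀ (k m n : Int), n - m = (L : Int) →
    altCount k ((L : Int) - 1) m n = (m + ((stepsFn L k).1 : Int), (stepsFn L k).2) := by
  induction L with
  | zero =>
      intro k m n hL
      rw [altCount, stepsFn]
      rw [dif_neg (by omega)]
      simp
  | succ L ih =>
      intro k m n hL
      rw [altCount, stepsFn]
      by_cases hk : (L : Int) ≤ k
      · rw [dif_pos (by push_cast; constructor <;> omega)]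
        
        rw [show ((L + 1 : Nat) : Int) - 1 = (L : Int) by push_cast; ring]
        rw [ih (k - L) (m + 1) n (by omega)]
        simp only [if_pos hk, Prod.mk.injEq]
        refine ⟨by push_cast; ring, trivial⟩
      · rw [dif_neg (by push_cast; omega)]
        simp only [if_neg hk]
        simp

lemma funcLoop_char (L : Nat) : ∀ (nums : List Int), nums.length = L → ∀ (k : Int) (res : List Int),
    funcLoop nums k ((L : Int) - 1) res =
      (nums.take (L - (stepsFn L k).1),
       res ++ (nums.drop (L - (stepsFn L k).1)).reverse,
       (stepsFn L k).2) := by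
  induction L with
  | zero =>
      intro nums hlen k res
      have hnil : nums = [] := List.length_eq_zero_iff.mp hlen
      subst hnil
      rw [funcLoop, dif_neg (by simp)]
      simp [stepsFn]
  | succ L ih =>
      intro nums hlen k res
      have hne : nums ≠ [] := by
        intro h; subst h; simp at hlen
      rw [funcLoop, stepsFn]
      by_cases hk : (L : Int) ≤ k
      · have hstep : ((L + 1 : Nat) : Int) - 1 = (L : Int) := by push_cast; ring
        rw [dif_pos ⟨by omega, hne⟩]
        have hdl : nums.dropLast.length = L := by
          simp [List.length_dropLast, hlen]
        have hrec := ih nums.dropLast hdl (k - L) (res ++ [nums.getLast hne])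
        rw [show k - (((L + 1 : Nat) : Int) - 1) = k - L by omega,
            show ((L + 1 : Nat) : Int) - 1 - 1 = (L : Int) - 1 by push_cast; ring]
        rw [hrec]
        simp only [if_pos hk]
        have hd := stepsFn_le L (k - L)
        set d := (stepsFn L (k - L)).1 with hdset
        have h1 : L + 1 - (d + 1) = L - d := by omega
        have hsplit : nums.dropLast ++ [nums.getLast hne] = nums :=
          List.dropLast_concat_getLast hne
        simp only [Prod.mk.injEq]
        refine ⟨?_, ?_, trivial⟩
        · -- take part
          rw [h1]
          have : nums.take (L - d) = (nums.dropLast ++ [nums.getLast hne]).take (L - d) := by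
            rw [hsplit]
          rw [this, List.take_append_of_le_length (by omega)]
        · -- result part
          rw [h1]
          have : nums.drop (L - d) = (nums.dropLast ++ [nums.getLast hne]).drop (L - d) := by
            rw [hsplit]
          rw [this, List.drop_append_of_le_length (by omega)]
          simp [List.reverse_append]
      · rw [dif_neg (by push_cast; omega)]
        simp only [if_neg hk, Prod.mk.injEq]
        refine ⟨?_, ?_, trivial⟩
        · rw [Nat.sub_zero, List.take_of_length_le (by omega)]
        · rw [Nat.sub_zero, List.drop_eq_nil_of_le (by omega)]
          simp

-- ===== VERDICT (by name: the statement is the Claim_ definition above) =====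
theorem func_spec : Claim_equal_func := by
  intro n k _hdom _hpre
  simp only [Spec_func, func, func_alt]
  by_cases hn : n ≤ 0
  · -- n <= 0: both sides are []
    have hnil : PySem.List.pyRange 1 (n + 1) 1 = [] :=
      PySem.List.pyRange_one_eq_nil (by omega)
    have h1 : funcLoop (PySem.List.pyRange 1 (n + 1) 1) k (n - 1) [] = ([], [], k) := by
      rw [hnil, funcLoop, dif_neg (by simp)]
    have h2 : altCount k (n - 1) 0 n = (0, k) := by
      rw [altCount, dif_neg (by omega)]
    rw [h1, h2]
    simp [hnil, PySem.List.pyRange_neg_one_eq_nil (le_refl n)]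
  · -- n >= 1
    have hn' : 1 ≤ n := by omega
    set L := n.toNat with hL
    have hnL : n = (L : Int) := by omega
    have hlen : (PySem.List.pyRange 1 (n + 1) 1).length = L := by
      rw [PySem.List.length_pyRange_one]; omega
    have hd := stepsFn_le L k
    set d := (stepsFn L k).1 with hdset
    set k' := (stepsFn L k).2 with hkset
    have hloop := funcLoop_char L _ hlen k []
    have halt := altCount_eq L k 0 n (by omega)
    rw [show n - 1 = (L : Int) - 1 from by omega, hloop, halt]
    simp only [zero_add, List.nil_append]
    -- identify the pieces
    have hsplit : PySem.List.pyRange 1 (n + 1) 1 =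
        PySem.List.pyRange 1 (n - (d : Int) + 1) 1 ++ PySem.List.pyRange (n - (d : Int) + 1) (n + 1) 1 :=
      PySem.List.pyRange_one_append 1 (n - (d : Int) + 1) (n + 1) (by omega) (by omega)
    have hlen1 : (PySem.List.pyRange 1 (n - (d : Int) + 1) 1).length = L - d := by
      rw [PySem.List.length_pyRange_one]; omega
    have htake : (PySem.List.pyRange 1 (n + 1) 1).take (L - d) =
        PySem.List.pyRange 1 (n - (d : Int) + 1) 1 := by
      rw [hsplit, ← hlen1, List.take_left]
    have hbig : ((PySem.List.pyRange 1 (n + 1) 1).drop (L - d)).reverse =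
        PySem.List.pyRange n (n - (d : Int)) (-1) := by
      rw [hsplit, ← hlen1, List.drop_left, PySem.List.pyRange_neg_one_eq_reverse]
    rw [htake, hbig, ← hdset, ← hkset]
    by_cases hsm : PySem.List.pyRange 1 (n - (d : Int) + 1) 1 = []
    · rw [hsm]; simp
    · rw [if_pos hsm, if_pos hsm]
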